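-- pv_equiv track=rewrite | github.com/sanyahegde/hackai-project | backend/services/skill_scorer.py | build_user_history_text
-- ===== SOURCE A (Python) =====
-- from collections import Counter
--
-- def build_user_history_text(logs: list[dict]) -> str:
--     if not logs:
--         return ""
--     counts = Counter()
--     for log in logs:
--         name = (log.get("concept_name") or log.get("concept") or "").strip()
--         if name:
--             counts[name] += 1
--     tokens = []
--     for concept_name, count in counts.items():
--         tokens.extend([concept_name.lower()] * count)
--     return " ".join(tokens)
-- ===== SOURCE B (Python) =====
-- def build_user_history_text(logs: list[dict]) -> str:
--     if not logs:
--         return ""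
--     names = []
--     first_seen = {}
--     for log in logs:
--         name = (log.get("concept_name") or log.get("concept") or "").strip()
--         if name:
--             if name not in first_seen:
--                 first_seen[name] = len(names)
--             names.append(name)
--     ordered = sorted(names, key=lambda n: first_seen[n])
--     return " ".join(n.lower() for n in ordered)
-- ===== Notes on version B (the rewrite author's own statement) =====
-- stated objective: alternative
-- what changed: Replaces the Counter-then-emit-groups pass with a flat occurrence list plus a first-appearance index, producing the output by a stable sort of the occurrences on that index.
import Mathlib
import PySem

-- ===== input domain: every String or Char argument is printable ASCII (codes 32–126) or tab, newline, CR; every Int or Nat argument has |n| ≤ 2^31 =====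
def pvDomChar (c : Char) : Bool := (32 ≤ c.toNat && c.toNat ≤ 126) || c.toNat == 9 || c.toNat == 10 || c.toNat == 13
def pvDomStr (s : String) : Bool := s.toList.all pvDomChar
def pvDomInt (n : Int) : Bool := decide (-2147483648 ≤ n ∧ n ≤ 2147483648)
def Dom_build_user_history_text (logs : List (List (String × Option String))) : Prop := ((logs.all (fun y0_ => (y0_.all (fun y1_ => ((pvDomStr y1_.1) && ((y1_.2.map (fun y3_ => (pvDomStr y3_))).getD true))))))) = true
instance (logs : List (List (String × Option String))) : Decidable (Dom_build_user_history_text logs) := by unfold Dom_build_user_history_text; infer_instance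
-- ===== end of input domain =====

-- B replaces A's Counter-then-emit-groups pass by a flat occurrence list stably sorted on a
-- first-appearance index (alternative algorithm, identical results).

-- shared helper: the Python expression `(log.get("concept_name") or log.get("concept") or "").strip()`,
-- which A and B compute identically
def pvOrStr (o : Option String) (e : String) : String :=
  match o with
  | some s => if s = "" then e else s
  | none => e

def pvCleanName (log : List (String × Option String)) : String :=
  PySem.Str.strip (pvOrStr (((PySem.Dict.mk log).get? "concept_name").getD none)
    (pvOrStr (((PySem.Dict.mk log).get? "concept").getD none) ""))

-- ===== PORT A =====
def build_user_history_text (logs : List (List (String × Option String))) : String :=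
  if logs = [] then ""
  else
    -- counts, then tokens, then the join (the two locals are single-use and inlined)
    PySem.Str.join " "
      ((logs.foldl (fun d log =>
        let name := pvCleanName log
        if name ≠ "" then d.modify name 0 (· + 1) else d) PySem.Dict.empty).items.foldl
        (fun acc p => acc ++ PySem.List.pyRepeat [PySem.Str.lower p.1] p.2) [])

-- ===== PORT B =====
def build_user_history_text_alt (logs : List (List (String × Option String))) : String :=
  if logs = [] then ""
  else
    -- st = (names, first_seen) after the loop; `first_seen[n]`: every n in names is a key of
    -- first_seen, so the sort-key lookup never raises and getD is exact here
    (fun st : List String × PySem.Dict String Int =>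
      PySem.Str.join " " ((PySem.List.sorted st.1 (fun n => st.2.getD n 0)).map PySem.Str.lower))
    (logs.foldl (fun st log =>
      let name := pvCleanName log
      if name ≠ "" then
        (st.1 ++ [name],
         if st.2.contains name then st.2 else st.2.insert name (st.1.length : Int))
      else st) ([], PySem.Dict.empty))

-- ===== PRECONDITION & SPEC =====
def Spec_build_user_history_text (logs : List (List (String × Option String))) (out : String) : Prop := out = build_user_history_text_alt logs
instance (logs : List (List (String × Option String))) (out : String) : Decidable (Spec_build_user_history_text logs out) := by unfold Spec_build_user_history_text; infer_instance

-- ===== CLAIM (what is proved, stated in full; the proofs are below) =====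
def Claim_equal_build_user_history_text : Prop := ∀ (logs : List (List (String × Option String))), Dom_build_user_history_text logs → Spec_build_user_history_text logs (build_user_history_text logs)

-- ===== LEMMAS AND PROOFS =====

-- the cleaned, non-empty concept names of the logs, in order
def pvNames (logs : List (List (String × Option String))) : List String :=
  (logs.map pvCleanName).filter (fun n => decide (n ≠ ""))

lemma countsA_gen (logs : List (List (String × Option String))) :
    ∀ d : PySem.Dict String Int,
    logs.foldl (fun d log =>
      let name := pvCleanName log
      if name ≠ "" then d.modify name 0 (· + 1) else d) d
    = (pvNames logs).foldl (fun d x => d.modify x 0 (· + 1)) d := by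
  induction logs with
  | nil => intro d; simp [pvNames]
  | cons log t ih =>
    intro d
    rw [List.foldl_cons]
    by_cases h : pvCleanName log = ""
    · simp only [h, ne_eq, not_true_eq_false, if_false]
      rw [ih]
      simp [pvNames, h]
    · simp only [ne_eq, h, not_false_eq_true, if_true]
      rw [ih]
      simp [pvNames, h]

lemma countsA (logs : List (List (String × Option String))) :
    logs.foldl (fun d log =>
      let name := pvCleanName log
      if name ≠ "" then d.modify name 0 (· + 1) else d) PySem.Dict.empty
    = PySem.Dict.counter (pvNames logs) := by
  rw [countsA_gen, PySem.Dict.counter_eq_foldl]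

lemma Bfst (logs : List (List (String × Option String))) :
    ∀ (ns : List String) (fs : PySem.Dict String Int),
    (logs.foldl (fun st log =>
      let name := pvCleanName log
      if name ≠ "" then
        (st.1 ++ [name],
         if st.2.contains name then st.2 else st.2.insert name (st.1.length : Int))
      else st) (ns, fs)).1 = ns ++ pvNames logs := by
  induction logs with
  | nil => intro ns fs; simp [pvNames]
  | cons log t ih =>
    intro ns fs
    rw [List.foldl_cons]
    by_cases h : pvCleanName log = ""
    · simp only [h, ne_eq, not_true_eq_false, if_false]
      rw [ih]
      simp [pvNames, h]
    · simp only [ne_eq, h, not_false_eq_true, if_true]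
      by_cases hc : (fs.contains (pvCleanName log) : Bool)
      · simp only [hc, if_true]
        rw [ih]
        simp [pvNames, h]
      · simp only [hc]
        rw [ih]
        simp [pvNames, h]

lemma Bsnd (logs : List (List (String × Option String))) :
    ∀ (ns : List String) (fs : PySem.Dict String Int),
    (∀ n, fs.contains n = decide (n ∈ ns)) →
    (∀ n ∈ ns, fs.getD n 0 = (ns.idxOf n : Int)) →
    (∀ n, (logs.foldl (fun st log =>
      let name := pvCleanName log
      if name ≠ "" then
        (st.1 ++ [name],
         if st.2.contains name then st.2 else st.2.insert name (st.1.length : Int))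
      else st) (ns, fs)).2.contains n
        = decide (n ∈ (logs.foldl (fun st log =>
            let name := pvCleanName log
            if name ≠ "" then
              (st.1 ++ [name],
               if st.2.contains name then st.2 else st.2.insert name (st.1.length : Int))
            else st) (ns, fs)).1)) ∧
    (∀ n ∈ (logs.foldl (fun st log =>
      let name := pvCleanName log
      if name ≠ "" then
        (st.1 ++ [name],
         if st.2.contains name then st.2 else st.2.insert name (st.1.length : Int))
      else st) (ns, fs)).1,
      (logs.foldl (fun st log =>
        let name := pvCleanName log
        if name ≠ "" then
          (st.1 ++ [name],
           if st.2.contains name then st.2 else st.2.insert name (st.1.length : Int))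
        else st) (ns, fs)).2.getD n 0
      = ((logs.foldl (fun st log =>
          let name := pvCleanName log
          if name ≠ "" then
            (st.1 ++ [name],
             if st.2.contains name then st.2 else st.2.insert name (st.1.length : Int))
          else st) (ns, fs)).1.idxOf n : Int)) := by
  induction logs with
  | nil =>
    intro ns fs h1 h2
    exact ⟨h1, h2⟩
  | cons log t ih =>
    intro ns fs h1 h2
    rw [List.foldl_cons]
    by_cases h : pvCleanName log = ""
    · simp only [h, ne_eq, not_true_eq_false, if_false]
      exact ih ns fs h1 h2
    · simp only [ne_eq, h, not_false_eq_true, if_true]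
      by_cases hc : (fs.contains (pvCleanName log) : Bool)
      · simp only [hc, if_true]
        have hmem : pvCleanName log ∈ ns := by
          have := h1 (pvCleanName log); rw [hc] at this
          exact of_decide_eq_true this.symm
        refine ih (ns ++ [pvCleanName log]) fs ?_ ?_
        · intro n
          rw [h1 n]
          have : (n ∈ ns) ↔ (n ∈ ns ++ [pvCleanName log]) := by
            simp only [List.mem_append, List.mem_singleton]
            constructor
            · exact Or.inl
            · rintro (hn | rfl)
              · exact hn
              · exact hmem
          exact decide_eq_decide.mpr this
        · intro n hn
          have hn' : n ∈ ns := by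
            rcases List.mem_append.mp hn with h' | h'
            · exact h'
            · rw [List.mem_singleton.mp h']; exact hmem
          rw [h2 n hn', List.idxOf_append, if_pos hn']
      · simp only [hc]
        have hnmem : pvCleanName log ∉ ns := by
          have := h1 (pvCleanName log); rw [Bool.not_eq_true] at hc; rw [hc] at this
          exact of_decide_eq_false this.symm
        refine ih (ns ++ [pvCleanName log]) (fs.insert (pvCleanName log) (ns.length : Int)) ?_ ?_
        · intro n
          rw [PySem.Dict.contains_insert, h1 n]
          by_cases hn : n = pvCleanName log
          · subst hn; simp
          · simp [hn, List.mem_append]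
        · intro n hn
          by_cases hne : n = pvCleanName log
          · subst hne
            rw [PySem.Dict.getD_insert_self, List.idxOf_append, if_neg hnmem,
              List.idxOf_cons_self]
            simp
          · have hn' : n ∈ ns := by
              rcases List.mem_append.mp hn with h' | h'
              · exact h'
              · exact absurd (List.mem_singleton.mp h') hne
            rw [PySem.Dict.getD_insert_of_ne _ _ _ hne, h2 n hn',
              List.idxOf_append, if_pos hn']



lemma eq_of_perm_of_pairwise_le_of_memInj (key : String → Int) :
    ∀ {l₁ l₂ : List String}, l₁.Perm l₂ →
    (∀ a ∈ l₁, ∀ b ∈ l₁, key a = key b → a = b) →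
    l₁.Pairwise (fun a b => key a ≤ key b) →
    l₂.Pairwise (fun a b => key a ≤ key b) → l₁ = l₂ := by
  intro l₁
  induction l₁ with
  | nil =>
    intro l₂ hp _ _ _
    exact hp.nil_eq
  | cons a t ih =>
    intro l₂ hp hinj h₁ h₂
    cases l₂ with
    | nil => exact absurd hp.symm.nil_eq (by simp)
    | cons b u =>
      have hbmem : b ∈ a :: t := hp.symm.subset (List.mem_cons_self ..)
      have hab : a = b := by
        have hba : key a ≤ key b := by
          rcases List.mem_cons.mp hbmem with h | h
          · exact le_of_eq (by rw [h])
          · exact (List.pairwise_cons.mp h₁).1 b h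
        have hab2 : key b ≤ key a := by
          have hamem : a ∈ b :: u := hp.subset (List.mem_cons_self ..)
          rcases List.mem_cons.mp hamem with h | h
          · exact le_of_eq (by rw [h])
          · exact (List.pairwise_cons.mp h₂).1 a h
        exact hinj a (List.mem_cons_self ..) b hbmem (le_antisymm hba hab2)
      subst hab
      have hp' : t.Perm u := hp.cons_inv
      have := ih hp'
        (fun x hx y hy h => hinj x (List.mem_cons_of_mem _ hx) y (List.mem_cons_of_mem _ hy) h)
        (List.pairwise_cons.mp h₁).2 (List.pairwise_cons.mp h₂).2
      rw [this]

lemma foldl_add_eq (t : List String) :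
    ∀ acc : List String, List.foldl PySem.Set.add acc t
      = acc ++ (PySem.Set.ofList t).filter (fun y => decide (y ∉ acc)) := by
  induction t with
  | nil => intro acc; simp [PySem.Set.ofList_eq_foldl]
  | cons y t ih =>
    intro acc
    have h0 : PySem.Set.ofList (y :: t)
        = y :: (PySem.Set.ofList t).filter (fun z => decide (z ≠ y)) := by
      rw [PySem.Set.ofList_eq_foldl, List.foldl_cons]
      have hy : PySem.Set.add ([] : List String) y = [y] := by
        simp [PySem.Set.add]
      rw [hy, ih [y]]
      simp
    rw [List.foldl_cons, ih (PySem.Set.add acc y), h0]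
    by_cases hy : y ∈ acc
    · rw [PySem.Set.add_of_mem hy]
      simp only [List.filter_cons]
      have : (decide (y ∉ acc)) = false := by simp [hy]
      rw [this]
      simp only [List.filter_filter]
      congr 1
      apply List.filter_congr
      intro z _
      by_cases hz : z ∈ acc
      · simp [hz]
      · have : z ≠ y := fun h => hz (h ▸ hy)
        simp [hz, this]
    · rw [PySem.Set.add_of_not_mem hy]
      simp only [List.filter_cons]
      have : (decide (y ∉ acc)) = true := by simp [hy]
      rw [this]
      simp only [List.filter_filter, List.append_assoc, List.singleton_append]
      congr 1
      congr 1
      apply List.filter_congr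
      intro z _
      by_cases hz : z ∈ acc <;> by_cases hzy : z = y <;> simp [hz, hzy]

lemma ofList_cons (x : String) (t : List String) :
    PySem.Set.ofList (x :: t) = x :: (PySem.Set.ofList t).filter (fun y => decide (y ≠ x)) := by
  rw [PySem.Set.ofList_eq_foldl, List.foldl_cons]
  have hx : PySem.Set.add ([] : List String) x = [x] := by simp [PySem.Set.add]
  rw [hx, foldl_add_eq t [x]]
  simp

lemma ofList_pairwise_idxOf :
    ∀ l : List String, (PySem.Set.ofList l).Pairwise (fun a b => l.idxOf a < l.idxOf b) := by
  intro l
  induction l with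
  | nil => simp [PySem.Set.ofList_eq_foldl]
  | cons x t ih =>
    rw [ofList_cons]
    refine List.pairwise_cons.mpr ⟨?_, ?_⟩
    · intro b hb
      have hbx : b ≠ x := by simpa using List.of_mem_filter hb
      rw [List.idxOf_cons_self, List.idxOf_cons_ne _ (Ne.symm hbx)]
      exact Nat.succ_pos _
    · refine List.Pairwise.imp_of_mem ?_ (List.Pairwise.filter _ ih)
      intro a b ha hb h
      have hax : a ≠ x := by simpa using List.of_mem_filter ha
      have hbx : b ≠ x := by simpa using List.of_mem_filter hb
      rw [List.idxOf_cons_ne _ (Ne.symm hax), List.idxOf_cons_ne _ (Ne.symm hbx)]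
      exact Nat.succ_lt_succ h

lemma count_flatMap_replicate (c : String → Nat) (a : String) :
    ∀ l : List String, l.Nodup →
      (l.flatMap fun k => List.replicate (c k) k).count a = if a ∈ l then c a else 0 := by
  intro l
  induction l with
  | nil => simp
  | cons k t ih =>
    intro hnd
    rw [List.flatMap_cons, List.count_append, List.count_replicate, ih (List.nodup_cons.mp hnd).2]
    by_cases hak : a = k
    · subst hak
      have : a ∉ t := (List.nodup_cons.mp hnd).1
      simp [this]
    · simp [hak, Ne.symm hak]

lemma perm_grouped (names : List String) :
    names.Perm ((PySem.Set.ofList names).flatMap fun k => List.replicate (names.count k) k) := by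
  rw [List.perm_iff_count]
  intro a
  rw [count_flatMap_replicate _ _ _ (PySem.Set.nodup_ofList names)]
  by_cases h : a ∈ names
  · simp [PySem.Set.mem_ofList, h]
  · simp [PySem.Set.mem_ofList, h, List.count_eq_zero_of_not_mem h]

lemma flatMap_replicate_pairwise (key : String → Int) (c : String → Nat) :
    ∀ l : List String, l.Pairwise (fun a b => key a < key b) →
      (l.flatMap fun k => List.replicate (c k) k).Pairwise (fun a b => key a ≤ key b) := by
  intro l
  induction l with
  | nil => simp
  | cons k t ih =>
    intro h
    rw [List.flatMap_cons]
    refine List.pairwise_append.mpr ⟨?_, ih (List.pairwise_cons.mp h).2, ?_⟩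
    · exact List.pairwise_replicate.mpr (Or.inr (le_refl _))
    · intro a ha b hb
      obtain ⟨k2, hk2, hb2⟩ := List.mem_flatMap.mp hb
      have hak : a = k := (List.mem_replicate.mp ha).2
      have hbk : b = k2 := (List.mem_replicate.mp hb2).2
      rw [hak, hbk]
      exact le_of_lt ((List.pairwise_cons.mp h).1 k2 hk2)

lemma sorted_eq_grouped (names : List String) (key : String → Int)
    (hk : ∀ n ∈ names, key n = (names.idxOf n : Int)) :
    PySem.List.sorted names key
      = (PySem.Set.ofList names).flatMap fun k => List.replicate (names.count k) k := by
  have hperm : (PySem.List.sorted names key).Perm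
      ((PySem.Set.ofList names).flatMap fun k => List.replicate (names.count k) k) :=
    (PySem.List.sorted_perm names key false).trans (perm_grouped names)
  refine eq_of_perm_of_pairwise_le_of_memInj key hperm ?_
    (PySem.List.sorted_pairwise names key) ?_
  · intro a ha b hb h
    have ha' : a ∈ names := (PySem.List.sorted_perm names key false).subset ha
    have hb' : b ∈ names := (PySem.List.sorted_perm names key false).subset hb
    rw [hk a ha', hk b hb'] at h
    have hidx : names.idxOf a = names.idxOf b := by exact_mod_cast h
    have h1 : names.idxOf a < names.length := List.idxOf_lt_length_of_mem ha'
    have h2 : names.idxOf b < names.length := List.idxOf_lt_length_of_mem hb'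
    calc a = names[names.idxOf a]'h1 := (List.getElem_idxOf h1).symm
    _ = names[names.idxOf b]'h2 := by simp only [hidx]
    _ = b := List.getElem_idxOf h2
  · refine flatMap_replicate_pairwise key _ _ ?_
    refine List.Pairwise.imp_of_mem ?_ (ofList_pairwise_idxOf names)
    intro a b ha hb h
    rw [hk a ((PySem.Set.mem_ofList names a).mp ha), hk b ((PySem.Set.mem_ofList names b).mp hb)]
    exact_mod_cast h


lemma ports_eq (logs : List (List (String × Option String))) :
    build_user_history_text logs = build_user_history_text_alt logs := by
  by_cases hl : logs = []
  · simp [build_user_history_text, build_user_history_text_alt, hl]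
  · unfold build_user_history_text build_user_history_text_alt
    rw [if_neg hl, if_neg hl]
    beta_reduce
    rw [countsA logs, PySem.List.foldl_append_eq_flatMap, PySem.Dict.items_counter,
      List.flatMap_map, List.nil_append]
    have hfst := Bfst logs [] PySem.Dict.empty
    have hsnd := Bsnd logs [] PySem.Dict.empty
      (by intro n; simp [PySem.Dict.contains_empty]) (by intro n hn; simp at hn)
    rw [List.nil_append] at hfst
    have hkey : ∀ n ∈ pvNames logs,
        (logs.foldl (fun st log =>
          let name := pvCleanName log
          if name ≠ "" then
            (st.1 ++ [name],
             if st.2.contains name then st.2 else st.2.insert name (st.1.length : Int))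
          else st) (([] : List String), PySem.Dict.empty)).2.getD n 0
        = ((pvNames logs).idxOf n : Int) := by
      intro n hn
      have := hsnd.2 n (by rw [hfst]; exact hn)
      rw [hfst] at this
      exact this
    rw [hfst, sorted_eq_grouped (pvNames logs) _ hkey]
    simp only [PySem.List.pyRepeat_singleton, Int.toNat_natCast, List.map_flatMap,
      List.map_replicate]

-- ===== VERDICT (by name: the statement is the Claim_ definition above) =====
theorem build_user_history_text_spec : Claim_equal_build_user_history_text := by
  intro logs _
  exact ports_eq logs
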